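-- pv_equiv track=rewrite | github.com/dpareja/audioprotocol | audio_protocol.py | bits_to_symbols
-- ===== SOURCE A (Python) =====
-- def bits_to_symbols(bits):
--     """Convierte bits a símbolos de 2 bits"""
--     symbols = []
--     for i in range(0, len(bits), 2):
--         if i+1 < len(bits):
--             symbol = (bits[i] << 1) | bits[i+1]
--         else:
--             symbol = bits[i] << 1
--         symbols.append(symbol)
--     return symbols
-- ===== SOURCE B (Python) =====
-- def bits_to_symbols(bits):
--     """Convierte bits a símbolos de 2 bits"""
--     high = bits[::2]
--     low = bits[1::2] + [0] * (len(bits) % 2)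
--     return [(h << 1) | l for h, l in zip(high, low)]
-- ===== Notes on version B (the rewrite author's own statement) =====
-- stated objective: alternative
-- what changed: Replaces the index-stepping loop with its tail guard by a split-into-strided-slices decomposition: even-index and odd-index slices (odd side padded with one 0 when the length is odd) are zipped and each pair combined into a symbol in one comprehension.
import Mathlib
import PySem

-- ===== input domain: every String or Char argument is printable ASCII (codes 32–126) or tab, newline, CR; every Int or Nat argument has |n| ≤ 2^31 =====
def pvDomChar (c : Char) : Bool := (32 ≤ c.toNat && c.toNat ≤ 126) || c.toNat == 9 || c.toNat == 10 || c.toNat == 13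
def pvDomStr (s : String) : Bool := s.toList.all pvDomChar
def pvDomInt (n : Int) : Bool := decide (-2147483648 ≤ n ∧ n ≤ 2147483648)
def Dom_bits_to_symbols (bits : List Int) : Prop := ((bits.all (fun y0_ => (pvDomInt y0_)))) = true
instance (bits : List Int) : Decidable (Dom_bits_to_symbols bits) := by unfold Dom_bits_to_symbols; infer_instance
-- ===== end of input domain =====

-- B splits the input into the even-index and odd-index strided slices and zips them
-- (padding the odd side with one 0 for odd length) instead of A's index-stepping loop
-- with a tail guard; same O(n) cost, different decomposition.

-- ===== PORT A =====
-- literal port of A: loop over range(0, len(bits), 2), append one symbol per step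
def bits_to_symbols (bits : List Int) : List Int :=
  (PySem.List.pyRange 0 (bits.length : Int) 2).foldl
    (fun symbols i =>
      if i + 1 < (bits.length : Int) then
        symbols ++ [PySem.Int.bor ((PySem.List.pyGetD bits i 0) <<< 1) (PySem.List.pyGetD bits (i + 1) 0)]
      else
        symbols ++ [(PySem.List.pyGetD bits i 0) <<< 1]) []

-- ===== PORT B =====
def bits_to_symbols_alt (bits : List Int) : List Int :=
  let high : List Int := (PySem.List.slice? bits none none 2).getD []     -- bits[::2]
  let low : List Int := (PySem.List.slice? bits (some 1) none 2).getD []  -- bits[1::2]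
             ++ List.replicate (bits.length % 2) (0:Int)                  -- + [0] * (len(bits) % 2)
  (high.zip low).map (fun (p : Int × Int) => PySem.Int.bor (p.1 <<< 1) p.2)

-- ===== PRECONDITION & SPEC =====
def Spec_bits_to_symbols (bits : List Int) (out : List Int) : Prop := out = bits_to_symbols_alt bits
instance (bits : List Int) (out : List Int) : Decidable (Spec_bits_to_symbols bits out) := by unfold Spec_bits_to_symbols; infer_instance

-- ===== CLAIM (what is proved, stated in full; the proofs are below) =====
def Claim_equal_bits_to_symbols : Prop := ∀ (bits : List Int), Dom_bits_to_symbols bits → Spec_bits_to_symbols bits (bits_to_symbols bits)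

-- ===== LEMMAS AND PROOFS =====

-- common reference recursion: one symbol per pair of bits, tail bit shifted alone
def pvPairs : List Int → List Int
  | [] => []
  | [a] => [a <<< 1]
  | a :: b :: t => PySem.Int.bor (a <<< 1) b :: pvPairs t

theorem pvPyRange_two_cons (a b : Int) (h : a < b) :
    PySem.List.pyRange a b 2 = a :: PySem.List.pyRange (a + 2) b 2 := by
  rw [PySem.List.pyRange_of_pos a b (by norm_num),
      PySem.List.pyRange_of_pos (a + 2) b (by norm_num)]
  have h2 : (if a < b then ((b - a + 2 - 1) / 2).toNat else 0)
      = (if a + 2 < b then ((b - (a + 2) + 2 - 1) / 2).toNat else 0) + 1 := by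
    split_ifs <;> omega
  rw [h2, List.range_succ_eq_map, List.map_cons, List.map_map]
  have hc : ((fun k : Nat => a + 2 * (k : Int)) ∘ Nat.succ) = fun k : Nat => a + 2 + 2 * (k : Int) := by
    funext k; simp [Function.comp]; ring
  simp [hc]

theorem pvA_eq_pairs : ∀ (bits : List Int), bits_to_symbols bits = pvPairs bits := by
  have main : ∀ (bits : List Int) (acc : List Int),
      (PySem.List.pyRange 0 (bits.length : Int) 2).foldl
        (fun symbols i =>
          if i + 1 < (bits.length : Int) then
            symbols ++ [PySem.Int.bor ((PySem.List.pyGetD bits i 0) <<< 1) (PySem.List.pyGetD bits (i + 1) 0)]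
          else
            symbols ++ [(PySem.List.pyGetD bits i 0) <<< 1]) acc = acc ++ pvPairs bits := by
    intro bits
    induction bits using pvPairs.induct with
    | case1 =>
        intro acc
        simp [PySem.List.pyRange_of_pos 0 0 (by norm_num : (0:Int) < 2), pvPairs]
    | case2 a =>
        intro acc
        have h1 : PySem.List.pyRange 0 ((([a] : List Int).length : Int)) 2 = [0] := by
          simp only [List.length_singleton, Nat.cast_one]
          decide
        rw [h1]
        simp [pvPairs, PySem.List.pyGetD]
    | case3 a b t ih =>
        intro acc
        have hlen : (((a :: b :: t : List Int).length : Int)) = (t.length : Int) + 2 := by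
          simp; ring
        rw [hlen, pvPyRange_two_cons 0 ((t.length : Int) + 2) (by positivity)]
        rw [List.foldl_cons]
        have hbody0 :
            (if (0:Int) + 1 < (t.length : Int) + 2 then
              acc ++ [PySem.Int.bor ((PySem.List.pyGetD (a :: b :: t) 0 0) <<< 1) (PySem.List.pyGetD (a :: b :: t) (0 + 1) 0)]
            else acc ++ [(PySem.List.pyGetD (a :: b :: t) 0 0) <<< 1])
            = acc ++ [PySem.Int.bor (a <<< 1) b] := by
          rw [if_pos (by omega)]
          norm_num [PySem.List.pyGetD]
        rw [hbody0]
        have hshift : PySem.List.pyRange (0 + 2) ((t.length : Int) + 2) 2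
            = (PySem.List.pyRange 0 (t.length : Int) 2).map (fun i => i + 2) := by
          rw [PySem.List.pyRange_of_pos (0 + 2) ((t.length : Int) + 2) (by norm_num),
              PySem.List.pyRange_of_pos 0 (t.length : Int) (by norm_num)]
          have hc : (if (0:Int) + 2 < (t.length : Int) + 2 then
                (((t.length : Int) + 2 - (0 + 2) + 2 - 1) / 2).toNat else 0)
              = (if (0:Int) < (t.length : Int) then (((t.length : Int) - 0 + 2 - 1) / 2).toNat else 0) := by
            split_ifs <;> omega
          rw [hc, List.map_map]
          congr 1; funext k; simp; ring
        rw [hshift, List.foldl_map]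
        have hcong :
            (PySem.List.pyRange 0 (t.length : Int) 2).foldl
              (fun symbols i =>
                if i + 2 + 1 < (t.length : Int) + 2 then
                  symbols ++ [PySem.Int.bor ((PySem.List.pyGetD (a :: b :: t) (i + 2) 0) <<< 1)
                               (PySem.List.pyGetD (a :: b :: t) (i + 2 + 1) 0)]
                else symbols ++ [(PySem.List.pyGetD (a :: b :: t) (i + 2) 0) <<< 1])
              (acc ++ [PySem.Int.bor (a <<< 1) b])
            = (PySem.List.pyRange 0 (t.length : Int) 2).foldl
              (fun symbols i =>
                if i + 1 < (t.length : Int) then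
                  symbols ++ [PySem.Int.bor ((PySem.List.pyGetD t i 0) <<< 1) (PySem.List.pyGetD t (i + 1) 0)]
                else symbols ++ [(PySem.List.pyGetD t i 0) <<< 1])
              (acc ++ [PySem.Int.bor (a <<< 1) b]) := by
          apply PySem.List.foldl_congr_mem
          intro s i hi
          have hi0 : 0 ≤ i := by
            have hm := (PySem.List.mem_pyRange_iff_of_pos (s := (2:Int)) (by norm_num) i).mp hi
            omega
          have g1 : PySem.List.pyGetD (a :: b :: t) (i + 2) 0 = PySem.List.pyGetD t i 0 := by
            rw [PySem.List.pyGetD_of_nonneg _ _ (by omega), PySem.List.pyGetD_of_nonneg _ _ hi0]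
            have : (i + 2).toNat = i.toNat + 2 := by omega
            rw [this]; rfl
          have g2 : PySem.List.pyGetD (a :: b :: t) (i + 2 + 1) 0 = PySem.List.pyGetD t (i + 1) 0 := by
            rw [PySem.List.pyGetD_of_nonneg _ _ (by omega), PySem.List.pyGetD_of_nonneg _ _ (by omega)]
            have : (i + 2 + 1).toNat = (i + 1).toNat + 2 := by omega
            rw [this]; rfl
          simp only [g1, g2]
          have g3 : (i + 2 + 1 < (t.length : Int) + 2) ↔ (i + 1 < (t.length : Int)) := by omega
          simp only [g3]
        rw [hcong, ih (acc ++ [PySem.Int.bor (a <<< 1) b])]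
        simp [pvPairs]
  intro bits
  have := main bits []
  simpa [bits_to_symbols] using this

-- the even-index strided slice
def pvEvens : List Int → List Int
  | [] => []
  | [a] => [a]
  | a :: _ :: t => a :: pvEvens t

theorem pvSlice_evens : ∀ (xs : List Int),
    PySem.List.slice? xs none none 2 = some (pvEvens xs) := by
  have core : ∀ (xs : List Int),
      List.filterMap (fun (k : Nat) => xs[((0:Int) + 2 * (k : Int)).toNat]?)
        (List.range (((xs.length : Int) + 1) / 2).toNat) = pvEvens xs := by
    intro xs
    induction xs using pvEvens.induct with
    | case1 => simp [pvEvens]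
    | case2 a => simp [pvEvens]
    | case3 a b t ih =>
        have hc : ((((a :: b :: t : List Int).length : Int) + 1) / 2).toNat
            = (((t.length : Int) + 1) / 2).toNat + 1 := by
          simp; omega
        rw [hc, List.range_succ_eq_map]
        have h0 : (a :: b :: t)[((0:Int) + 2 * ((0:Nat) : Int)).toNat]? = some a := by simp
        simp only [List.filterMap_cons, h0]
        rw [show pvEvens (a :: b :: t) = a :: pvEvens t from rfl]
        congr 1
        rw [← ih, List.filterMap_map]
        apply List.filterMap_congr
        intro k _
        simp only [Function.comp_apply]
        have h1 : ((0:Int) + 2 * ((Nat.succ k : Nat) : Int)).toNat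
            = ((0:Int) + 2 * (k : Int)).toNat + 2 := by omega
        rw [h1]; rfl
  intro xs
  rw [PySem.List.slice?]
  simp only [if_neg (by norm_num : (2:Int) ≠ 0)]
  have hidx : PySem.List.sliceIndices xs.length none none 2 = (0, (xs.length : Int), 2) := by
    simp [PySem.List.sliceIndices]
  rw [hidx]
  have hcnt : (if (0:Int) < (xs.length : Int) then (((xs.length : Int) - 0 + 2 - 1) / 2).toNat else 0)
      = (((xs.length : Int) + 1) / 2).toNat := by
    split_ifs <;> omega
  simp only [show ((0:Int) < 2) = True by simp, if_true, hcnt]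
  rw [core xs]

theorem pvSlice_odds : ∀ (xs : List Int),
    PySem.List.slice? xs (some 1) none 2 = some (pvEvens xs.tail) := by
  intro xs
  match xs with
  | [] => decide
  | a :: t =>
      rw [PySem.List.slice?]
      simp only [if_neg (by norm_num : (2:Int) ≠ 0)]
      have hidx : PySem.List.sliceIndices (a :: t).length (some 1) none 2
          = (1, ((a :: t).length : Int), 2) := by
        simp [PySem.List.sliceIndices]
      rw [hidx]
      have hcnt : (if (0:Int) < 2 then if (1:Int) < ((a :: t).length : Int) then
            ((((a :: t).length : Int) - 1 + 2 - 1) / 2).toNat else 0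
          else if ((a :: t).length : Int) < 1 then ((1 - ((a :: t).length : Int) + -2 - 1) / -2).toNat else 0)
          = (((t.length : Int) + 1) / 2).toNat := by
        split_ifs <;> simp_all <;> omega
      rw [hcnt]
      have hfun : (fun (k : Nat) => (a :: t)[((1:Int) + 2 * (k : Int)).toNat]?)
          = (fun (k : Nat) => t[((0:Int) + 2 * (k : Int)).toNat]?) := by
        funext k
        have h1 : ((1:Int) + 2 * (k : Int)).toNat = (0 + 2 * (k : Int)).toNat + 1 := by
          omega
        rw [h1]; rfl
      rw [hfun]
      -- reuse the evens characterization through its slice form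
      have := pvSlice_evens t
      rw [PySem.List.slice?] at this
      simp only [if_neg (by norm_num : (2:Int) ≠ 0)] at this
      have hidx' : PySem.List.sliceIndices t.length none none 2 = (0, (t.length : Int), 2) := by
        simp [PySem.List.sliceIndices]
      rw [hidx'] at this
      have hcnt' : (if (0:Int) < 2 then if (0:Int) < (t.length : Int) then
            (((t.length : Int) - 0 + 2 - 1) / 2).toNat else 0
          else if (t.length : Int) < 0 then ((0 - (t.length : Int) + -2 - 1) / -2).toNat else 0)
          = (((t.length : Int) + 1) / 2).toNat := by
        split_ifs <;> simp_all <;> omega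
      rw [hcnt'] at this
      simpa using this

theorem pvZip_eq_pairs : ∀ (xs : List Int),
    ((pvEvens xs).zip (pvEvens xs.tail ++ List.replicate (xs.length % 2) (0:Int))).map
      (fun (p : Int × Int) => PySem.Int.bor (p.1 <<< 1) p.2) = pvPairs xs := by
  intro xs
  induction xs using pvPairs.induct with
  | case1 => simp [pvEvens, pvPairs]
  | case2 a => simp [pvEvens, pvPairs, PySem.Int.bor_zero]
  | case3 a b t ih =>
      have hlen : (a :: b :: t : List Int).length % 2 = t.length % 2 := by simp; omega
      simp only [pvEvens, List.tail_cons, hlen]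
      cases t with
      | nil => simp [pvEvens, pvPairs] at *
      | cons c t' =>
          simp only [show pvEvens (b :: c :: t') = b :: pvEvens t' from rfl]
          rw [List.cons_append, List.zip_cons_cons, List.map_cons, pvPairs]
          congr 1

theorem pvB_eq_pairs : ∀ (bits : List Int), bits_to_symbols_alt bits = pvPairs bits := by
  intro bits
  rw [bits_to_symbols_alt]
  simp only [pvSlice_evens, pvSlice_odds, Option.getD_some]
  exact pvZip_eq_pairs bits

-- ===== VERDICT (by name: the statement is the Claim_ definition above) =====
theorem bits_to_symbols_spec : Claim_equal_bits_to_symbols := by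
  intro bits _
  unfold Spec_bits_to_symbols
  rw [pvA_eq_pairs, pvB_eq_pairs]
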